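-- pv_equiv track=rewrite | github.com/MH221B/Gem-Hunter | walksat.py | checkSolve
-- ===== SOURCE A (Python) =====
-- from copy import deepcopy
--
-- def removeLiteral(clause, literal):
--     if literal in clause:
--         return True
--     if -literal in clause:
--         clause.remove(-literal)
--     return clause
--
-- def removeLiteralFromClauses(clauses, literal):
--     new_clauses = []
--     for clause in clauses:
--         copied_clause = deepcopy(clause)
--         new_clause = removeLiteral(copied_clause, literal)
--         if new_clause != True:
--             new_clauses.append(new_clause)
--     return new_clauses
--
-- def checkSolve(clauses, variable_values):
--     new_clauses = deepcopy(clauses)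
--     for val in variable_values:
--         if variable_values[val] == True:
--             new_clauses = removeLiteralFromClauses(new_clauses, val)
--         else:
--             new_clauses = removeLiteralFromClauses(new_clauses, -val)
--     if not new_clauses:
--         return True
--     if [] in new_clauses:
--         return False
-- ===== SOURCE B (Python) =====
-- def checkSolve(clauses, variable_values):
--     # one pass: effective literal set from the assignment, then scan each clause once
--     lits = {(v if b else -v) for v, b in variable_values.items()}
--     all_sat = True
--     found_empty = False
--     for clause in clauses:
--         if any(l in lits for l in clause):
--             continue
--         all_sat = False
--         if all(-l in lits for l in clause):
--             found_empty = True
--     if all_sat: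
--         return True
--     if found_empty:
--         return False
-- ===== Notes on version B (the rewrite author's own statement) =====
-- stated objective: faster
-- what changed: A repeatedly rewrites the whole clause list once per assigned variable (deepcopying and erasing literals); B builds the set of literals made true by the assignment once and scans each clause a single time, tracking all-satisfied / falsified-clause flags.
-- intended difference: On inputs where some fully falsified clause repeats a literal (and no duplicate-free clause is fully falsified) A returns None because its single list.remove deletes only one copy of the literal, leaving the clause non-empty; B returns False, the intended value since such a clause is falsified by the assignment. — e.g. on checkSolve([[-1, -1]], [(1, true)]): A returns none, B returns some false
-- outside the precondition, e.g. on checkSolve([[-1]], {1: True, -1: True}): A returns False, B returns True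
import Mathlib
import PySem

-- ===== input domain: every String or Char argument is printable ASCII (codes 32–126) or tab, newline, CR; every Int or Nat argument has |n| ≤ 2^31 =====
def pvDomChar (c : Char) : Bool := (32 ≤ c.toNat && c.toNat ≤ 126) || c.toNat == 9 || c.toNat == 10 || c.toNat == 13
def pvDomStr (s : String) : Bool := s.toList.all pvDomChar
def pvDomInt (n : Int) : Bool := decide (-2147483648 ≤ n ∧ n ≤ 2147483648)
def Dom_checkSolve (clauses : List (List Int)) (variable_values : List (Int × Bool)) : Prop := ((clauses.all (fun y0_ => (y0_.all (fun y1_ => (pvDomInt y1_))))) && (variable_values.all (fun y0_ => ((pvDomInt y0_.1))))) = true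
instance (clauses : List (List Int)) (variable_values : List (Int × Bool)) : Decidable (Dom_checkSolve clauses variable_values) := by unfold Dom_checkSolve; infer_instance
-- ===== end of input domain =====

-- B replaces A's repeated clause-rewriting sweeps (one pass over all clauses per assigned
-- variable, with list copies) by a single pass over the clauses testing each literal against
-- the set of literals made true by the assignment: faster by an asymptotic mechanism.
-- On clauses that repeat a falsified literal A's single `remove` leaves a stale literal behind
-- (returns None where the clause is falsified); B returns the intended False there (see D_).


-- ===== PORT A =====
-- Python's removeLiteral returns either True (clause satisfied) or the clause:
-- `none` stands for True, `some c` for the (possibly shortened) clause.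
def removeLiteral (clause : List Int) (literal : Int) : Option (List Int) :=
  if literal ∈ clause then none
  else if -literal ∈ clause then some ((PySem.List.remove? clause (-literal)).getD clause)
  else some clause

def removeLiteralFromClauses (clauses : List (List Int)) (literal : Int) : List (List Int) :=
  clauses.foldl (fun new_clauses clause =>
    match removeLiteral clause literal with
    | none => new_clauses
    | some new_clause => new_clauses ++ [new_clause]) []

def checkSolve (clauses : List (List Int)) (variable_values : List (Int × Bool)) : Option Bool :=
  let d := PySem.Dict.ofList variable_values
  let new_clauses := d.items.foldl (fun cs p =>
    if p.2 = true then removeLiteralFromClauses cs p.1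
    else removeLiteralFromClauses cs (-p.1)) clauses
  if new_clauses = [] then some true
  else if [] ∈ new_clauses then some false
  else none

-- ===== PORT B =====
def checkSolve_alt (clauses : List (List Int)) (variable_values : List (Int × Bool)) : Option Bool :=
  let lits : PySem.Set Int :=
    PySem.Set.ofList ((PySem.Dict.ofList variable_values).items.map (fun p => if p.2 then p.1 else -p.1))
  let st := clauses.foldl (fun (st : Bool × Bool) clause =>
    if clause.any (fun l => lits.contains l) then st
    else (false, st.2 || clause.all (fun l => lits.contains (-l)))) (true, false)
  if st.1 then some true
  else if st.2 then some false
  else none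

-- ===== PRECONDITION & SPEC =====
-- Pre_ excludes assignments whose key set contains both a nonzero v and -v: there A's answer
-- depends on the order the two contradictory keys are eliminated, an accidental corner no
-- caller of a CNF checker relies on.
def Pre_checkSolve (clauses : List (List Int)) (variable_values : List (Int × Bool)) : Prop :=
  ∀ p ∈ variable_values, p.1 = 0 ∨ -p.1 ∉ variable_values.map Prod.fst
instance (clauses : List (List Int)) (variable_values : List (Int × Bool)) : Decidable (Pre_checkSolve clauses variable_values) := by unfold Pre_checkSolve; infer_instance
def pvWitness_checkSolve : List (List Int) × (List (Int × Bool)) := ([[1, -2], [2]], [(1, true), (2, false)])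

-- On inputs where some fully falsified clause repeats a literal (and no duplicate-free clause
-- is fully falsified) A returns None — its single list.remove deletes only one copy, leaving
-- the clause non-empty — while B returns False, the intended value: the clause is falsified.
-- a clause of nonzero literals every one of which the assignment (as a dict) makes false
def pvFalsC (d : PySem.Dict Int Bool) (c : List Int) : Prop :=
  ∀ l ∈ c, l ≠ 0 ∧ (d.get? (-l) = some true ∨ d.get? l = some false)
def D_checkSolve (clauses : List (List Int)) (variable_values : List (Int × Bool)) : Prop :=
  (∃ c ∈ clauses, pvFalsC (PySem.Dict.ofList variable_values) c) ∧
  ∀ c ∈ clauses, pvFalsC (PySem.Dict.ofList variable_values) c → ¬ c.Nodup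
instance (clauses : List (List Int)) (variable_values : List (Int × Bool)) : Decidable (D_checkSolve clauses variable_values) := by unfold D_checkSolve pvFalsC; infer_instance

def Spec_checkSolve (clauses : List (List Int)) (variable_values : List (Int × Bool)) (out : Option Bool) : Prop := ¬ D_checkSolve clauses variable_values → out = checkSolve_alt clauses variable_values
instance (clauses : List (List Int)) (variable_values : List (Int × Bool)) (out : Option Bool) : Decidable (Spec_checkSolve clauses variable_values out) := by unfold Spec_checkSolve; infer_instance

def pvDiffWitness_checkSolve : List (List Int) × (List (Int × Bool)) := ([[-1, -1]], [(1, true)])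
def pvDiffWitnessOut_checkSolve : (Option Bool) × (Option Bool) := (none, some false)

-- ===== CLAIM (what is proved, stated in full; the proofs are below) =====
def Claim_unchanged_checkSolve : Prop := ∀ (clauses : List (List Int)) (variable_values : List (Int × Bool)), Dom_checkSolve clauses variable_values → Pre_checkSolve clauses variable_values → Spec_checkSolve clauses variable_values (checkSolve clauses variable_values)
def Claim_changed_checkSolve : Prop := Dom_checkSolve (pvDiffWitness_checkSolve.1) (pvDiffWitness_checkSolve.2) ∧ Pre_checkSolve (pvDiffWitness_checkSolve.1) (pvDiffWitness_checkSolve.2) ∧ D_checkSolve (pvDiffWitness_checkSolve.1) (pvDiffWitness_checkSolve.2) ∧ checkSolve (pvDiffWitness_checkSolve.1) (pvDiffWitness_checkSolve.2) = pvDiffWitnessOut_checkSolve.1 ∧ checkSolve_alt (pvDiffWitness_checkSolve.1) (pvDiffWitness_checkSolve.2) = pvDiffWitnessOut_checkSolve.2 ∧ pvDiffWitnessOut_checkSolve.1 ≠ pvDiffWitnessOut_checkSolve.2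
def Claim_exact_checkSolve : Prop := ∀ (clauses : List (List Int)) (variable_values : List (Int × Bool)), Dom_checkSolve clauses variable_values → Pre_checkSolve clauses variable_values → D_checkSolve clauses variable_values → checkSolve clauses variable_values ≠ checkSolve_alt clauses variable_values

-- ===== LEMMAS AND PROOFS =====

-- the effective literal of one assignment entry, and the list of literals made true
def pvLits (variable_values : List (Int × Bool)) : List Int :=
  (PySem.Dict.ofList variable_values).items.map (fun p => if p.2 then p.1 else -p.1)

-- processing of one clause through the successive eliminations of A's outer loop
def pvProc : List Int → List Int → Option (List Int)
  | [], c => some c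
  | L :: ls, c =>
    match removeLiteral c L with
    | none => none
    | some c' => pvProc ls c'

-- a well-formed elimination sequence: pairwise distinct and non-opposite literals
def pvGood (ls : List Int) : Prop :=
  ls.Pairwise (fun a b => a ≠ b ∧ a + b ≠ 0)

lemma removeLiteral_eq (c : List Int) (L : Int) :
    removeLiteral c L =
      if L ∈ c then none else if -L ∈ c then some (c.erase (-L)) else some c := by
  have h : (PySem.List.remove? c (-L)).getD c = c.erase (-L) := by
    rw [PySem.List.remove?, List.erase_eq_eraseIdx]
    cases h : List.idxOf? (-L) c <;> simp
  rw [removeLiteral, h]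

lemma pvFoldl_collect (l : List (List Int)) (acc : List (List Int)) (L : Int) :
    l.foldl (fun new_clauses clause => match removeLiteral clause L with
      | none => new_clauses
      | some new_clause => new_clauses ++ [new_clause]) acc
      = acc ++ l.filterMap (fun c => removeLiteral c L) := by
  induction l generalizing acc with
  | nil => simp
  | cons x xs ih =>
    cases h : removeLiteral x L <;> simp [h, ih]

lemma rLFC_eq_filterMap (cs : List (List Int)) (L : Int) :
    removeLiteralFromClauses cs L = cs.filterMap (fun c => removeLiteral c L) := by
  rw [removeLiteralFromClauses]
  simpa using pvFoldl_collect cs [] L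

lemma foldl_rLFC (ls : List Int) (cs : List (List Int)) :
    ls.foldl (fun cs L => removeLiteralFromClauses cs L) cs = cs.filterMap (pvProc ls) := by
  induction ls generalizing cs with
  | nil => simp [pvProc]
  | cons L ls ih =>
    rw [List.foldl_cons, ih, rLFC_eq_filterMap, List.filterMap_filterMap]
    apply List.filterMap_congr
    intro c _
    cases h : removeLiteral c L <;> simp [pvProc, h]

lemma pvGood_tail {L : Int} {ls : List Int} (h : pvGood (L :: ls)) : pvGood ls :=
  (List.pairwise_cons.mp h).2

lemma pvGood_not_neg {ls : List Int} (h : pvGood ls) {l : Int} (h0 : l ≠ 0) (hl : l ∈ ls) :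
    -l ∉ ls := by
  intro hneg
  have hsym : Symmetric (fun a b : Int => a ≠ b ∧ a + b ≠ 0) := by
    intro a b hab; exact ⟨fun e => hab.1 e.symm, fun e => hab.2 (by omega)⟩
  have hne : l ≠ -l := by omega
  have := (h.forall hsym) hl hneg hne
  omega

lemma pvProc_eq_none {ls : List Int} (h : pvGood ls) (c : List Int) :
    pvProc ls c = none ↔ ∃ l ∈ c, l ∈ ls := by
  induction ls generalizing c with
  | nil => simp [pvProc]
  | cons L ls ih =>
    have hhead := (List.pairwise_cons.mp h).1
    rw [pvProc, removeLiteral_eq]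
    by_cases hL : L ∈ c
    · simp only [hL, if_true]
      constructor
      · intro _; exact ⟨L, hL, List.mem_cons_self⟩
      · intro _; trivial
    · simp only [hL, if_false]
      have step : ∀ c' : List Int,
          ((∃ l ∈ c', l ∈ ls) ↔ ∃ l ∈ c, l ∈ L :: ls) →
          ((match (some c' : Option (List Int)) with
            | none => none
            | some c'' => pvProc ls c'') = none ↔ ∃ l ∈ c, l ∈ L :: ls) := by
        intro c' hiff
        simpa using (ih (pvGood_tail h) c').trans hiff
      by_cases hNL : -L ∈ c
      · simp only [hNL, if_true]
        apply step
        constructor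
        · rintro ⟨l, hl, hls⟩
          exact ⟨l, List.mem_of_mem_erase hl, List.mem_cons_of_mem _ hls⟩
        · rintro ⟨l, hl, hls⟩
          rcases List.mem_cons.mp hls with rfl | hls
          · exact absurd hl hL
          · have hlne : l ≠ -L := by
              intro rfl_e
              have := hhead l hls
              omega
            exact ⟨l, (List.mem_erase_of_ne hlne).mpr hl, hls⟩
      · simp only [hNL, if_false]
        apply step
        constructor
        · rintro ⟨l, hl, hls⟩; exact ⟨l, hl, List.mem_cons_of_mem _ hls⟩
        · rintro ⟨l, hl, hls⟩
          rcases List.mem_cons.mp hls with rfl | hls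
          · exact absurd hl hL
          · exact ⟨l, hl, hls⟩

lemma pvProc_eq_some_nil {ls : List Int} (h : pvGood ls) (c : List Int) :
    pvProc ls c = some [] ↔ c.Nodup ∧ ∀ l ∈ c, -l ∈ ls ∧ l ∉ ls := by
  induction ls generalizing c with
  | nil =>
    constructor
    · intro hc
      have : c = [] := by simpa [pvProc] using hc
      subst this; simp
    · rintro ⟨_, hf⟩
      cases c with
      | nil => rfl
      | cons x xs => exact absurd (hf x List.mem_cons_self).1 (by simp)
  | cons L ls ih =>
    have hhead := (List.pairwise_cons.mp h).1
    have hLnotls : L ∉ ls := fun hmem => (hhead L hmem).1 rfl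
    have hnegLnotls : -L ∉ ls := fun hmem => (hhead (-L) hmem).2 (by omega)
    rw [pvProc, removeLiteral_eq]
    by_cases hL : L ∈ c
    · simp only [hL, if_true]
      constructor
      · intro hc; exact absurd hc (by simp)
      · rintro ⟨_, hf⟩
        exact absurd List.mem_cons_self (hf L hL).2
    · simp only [hL, if_false]
      by_cases hNL : -L ∈ c
      · simp only [hNL, if_true]
        have hL0 : L ≠ 0 := by
          intro he; rw [he] at hNL hL; simp at hNL; exact hL hNL
        obtain ⟨l₁, l₂, hnot, hdec, herase⟩ := List.exists_erase_eq hNL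
        have hiff := ih (pvGood_tail h) (c.erase (-L))
        simp only [hiff]
        constructor
        · rintro ⟨nd', hf'⟩
          have hnotmem : -L ∉ c.erase (-L) := by
            intro hm
            have := (hf' (-L) hm).1
            simp only [neg_neg] at this
            exact hLnotls this
          constructor
          · rw [herase] at hnotmem nd'
            rw [hdec, List.nodup_middle, List.nodup_cons]
            exact ⟨hnotmem, nd'⟩
          · intro l hl
            by_cases hle : l = -L
            · subst hle
              refine ⟨by simp only [neg_neg]; exact List.mem_cons_self, ?_⟩
              intro hm
              rcases List.mem_cons.mp hm with he | hm'
              · omega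
              · exact hnegLnotls hm'
            · have hl' : l ∈ c.erase (-L) := (List.mem_erase_of_ne hle).mpr hl
              obtain ⟨h1, h2⟩ := hf' l hl'
              refine ⟨List.mem_cons_of_mem _ h1, ?_⟩
              intro hm
              rcases List.mem_cons.mp hm with he | hm'
              · exact hL (he ▸ hl)
              · exact h2 hm'
        · rintro ⟨nd, hf⟩
          refine ⟨nd.erase _, ?_⟩
          intro l hl
          have hlc : l ∈ c := List.mem_of_mem_erase hl
          obtain ⟨h1, h2⟩ := hf l hlc
          have hnotL : l ∉ ls → l ∉ ls := id
          refine ⟨?_, fun hm => h2 (List.mem_cons_of_mem _ hm)⟩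
          rcases List.mem_cons.mp h1 with he | hmem
          · exfalso
            have hle : l = -L := by omega
            subst hle
            rw [herase] at hl
            rw [hdec] at nd
            rw [List.nodup_middle, List.nodup_cons] at nd
            exact nd.1 hl
          · exact hmem
      · simp only [hNL, if_false]
        have hiff := ih (pvGood_tail h) c
        simp only [hiff]
        constructor
        · rintro ⟨nd, hf⟩
          refine ⟨nd, fun l hl => ?_⟩
          obtain ⟨h1, h2⟩ := hf l hl
          refine ⟨List.mem_cons_of_mem _ h1, ?_⟩
          intro hm
          rcases List.mem_cons.mp hm with he | hm'
          · exact hL (he ▸ hl)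
          · exact h2 hm'
        · rintro ⟨nd, hf⟩
          refine ⟨nd, fun l hl => ?_⟩
          obtain ⟨h1, h2⟩ := hf l hl
          refine ⟨?_, fun hm => h2 (List.mem_cons_of_mem _ hm)⟩
          rcases List.mem_cons.mp h1 with he | hmem
          · exfalso; apply hNL
            have : l = -L := by omega
            rw [← this]; exact hl
          · exact hmem

lemma mem_pvLits {variable_values : List (Int × Bool)} {x : Int} :
    x ∈ pvLits variable_values ↔
      ((PySem.Dict.ofList variable_values).get? x = some true ∨
       (PySem.Dict.ofList variable_values).get? (-x) = some false) := by
  have hnd := PySem.Dict.nodup_keys_ofList variable_values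
  rw [pvLits, List.mem_map]
  constructor
  · rintro ⟨⟨k, b⟩, hp, he⟩
    cases b with
    | true =>
      simp at he; subst he
      exact Or.inl (PySem.Dict.get?_of_mem_items _ hp hnd)
    | false =>
      simp at he
      have hk : k = -x := by omega
      subst hk
      exact Or.inr (PySem.Dict.get?_of_mem_items _ hp hnd)
  · rintro (hg | hg)
    · exact ⟨(x, true), PySem.Dict.mem_items_of_get?_eq_some _ hg, rfl⟩
    · exact ⟨(-x, false), PySem.Dict.mem_items_of_get?_eq_some _ hg, by simp⟩

lemma mem_keys_of_ofList {variable_values : List (Int × Bool)} {k : Int}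
    (h : k ∈ (PySem.Dict.ofList variable_values).keys) : k ∈ variable_values.map Prod.fst := by
  rw [PySem.Dict.ofList, PySem.Dict.update, PySem.Dict.keys_foldl_insert_key] at h
  rw [show (PySem.Dict.empty : PySem.Dict Int Bool).keys = [] from rfl] at h
  rw [PySem.Set.update_nil_left] at h
  exact (PySem.Set.mem_ofList _ _).mp h

lemma pvGood_pvLits {variable_values : List (Int × Bool)}
    (hpre : Pre_checkSolve [] variable_values) : pvGood (pvLits variable_values) := by
  have hkeys : ∀ k ∈ variable_values.map Prod.fst,
      k = 0 ∨ -k ∉ variable_values.map Prod.fst := by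
    intro k hk
    rw [List.mem_map] at hk
    obtain ⟨p, hp, he⟩ := hk
    subst he
    exact hpre p hp
  have hmem : ∀ p ∈ (PySem.Dict.ofList variable_values).items,
      p.1 ∈ variable_values.map Prod.fst := by
    intro p hp
    apply mem_keys_of_ofList
    rw [PySem.Dict.keys]
    exact List.mem_map_of_mem hp
  have hnd := PySem.Dict.nodup_keys_ofList variable_values
  rw [PySem.Dict.keys] at hnd
  rw [pvGood, pvLits, List.pairwise_map]
  have hpw : (PySem.Dict.ofList variable_values).items.Pairwise (fun p q => p.1 ≠ q.1) :=
    List.pairwise_map.mp hnd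
  refine hpw.imp_of_mem ?_
  intro p q hp hq hne
  have hkp := hmem p hp
  have hkq := hmem q hq
  have hne2 : p.1 ≠ -q.1 := by
    intro he
    rcases hkeys q.1 hkq with h0 | hnin
    · rw [h0] at he; simp at he; exact hne (by rw [he, h0])
    · exact hnin (he ▸ hkp)
  have hne3 : q.1 ≠ -p.1 := by
    intro he
    exact hne2 (by omega)
  by_cases hb1 : p.2 <;> by_cases hb2 : q.2 <;> simp [hb1, hb2] <;> omega

lemma B_fold {α : Type} (sat emp : α → Bool) (cs : List α) (a b : Bool) :
    cs.foldl (fun (st : Bool × Bool) c => if sat c then st else (false, st.2 || emp c)) (a, b)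
      = (a && cs.all sat, b || cs.any (fun c => !sat c && emp c)) := by
  induction cs generalizing a b with
  | nil => simp
  | cons c cs ih =>
    cases h : sat c with
    | true => simp [h, ih]
    | false => simp [h, ih, Bool.or_assoc]

-- master characterizations of the two ports (under Pre_)
lemma masterA (clauses : List (List Int)) (variable_values : List (Int × Bool))
    (hpre : Pre_checkSolve clauses variable_values) :
    checkSolve clauses variable_values =
      (if ∀ c ∈ clauses, ∃ l ∈ c, l ∈ pvLits variable_values then some true
       else if ∃ c ∈ clauses, c.Nodup ∧ ∀ l ∈ c, -l ∈ pvLits variable_values ∧ l ∉ pvLits variable_values then some false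
       else none) := by
  have hgood : pvGood (pvLits variable_values) := pvGood_pvLits (fun p hp => hpre p hp)
  have hstep : ∀ (cs : List (List Int)) (p : Int × Bool),
      (if p.2 = true then removeLiteralFromClauses cs p.1
       else removeLiteralFromClauses cs (-p.1))
        = removeLiteralFromClauses cs (if p.2 then p.1 else -p.1) := by
    intro cs p; by_cases hb : p.2 <;> simp [hb]
  have hfold : (PySem.Dict.ofList variable_values).items.foldl (fun cs p =>
      if p.2 = true then removeLiteralFromClauses cs p.1
      else removeLiteralFromClauses cs (-p.1)) clauses
      = clauses.filterMap (pvProc (pvLits variable_values)) := by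
    calc (PySem.Dict.ofList variable_values).items.foldl (fun cs p =>
          if p.2 = true then removeLiteralFromClauses cs p.1
          else removeLiteralFromClauses cs (-p.1)) clauses
        = (PySem.Dict.ofList variable_values).items.foldl (fun cs p =>
            removeLiteralFromClauses cs (if p.2 then p.1 else -p.1)) clauses := by
          apply PySem.List.foldl_congr_mem
          intro cs p _; exact hstep cs p
      _ = (pvLits variable_values).foldl (fun cs L => removeLiteralFromClauses cs L) clauses := by
          rw [pvLits, List.foldl_map]
      _ = clauses.filterMap (pvProc (pvLits variable_values)) := foldl_rLFC _ _
  rw [checkSolve]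
  simp only [hfold]
  by_cases hall : ∀ c ∈ clauses, ∃ l ∈ c, l ∈ pvLits variable_values
  · have h1 : clauses.filterMap (pvProc (pvLits variable_values)) = [] := by
      rw [List.filterMap_eq_nil_iff]
      intro c hc
      exact (pvProc_eq_none hgood c).mpr (hall c hc)
    rw [h1, if_pos rfl, if_pos hall]
  · have hne : clauses.filterMap (pvProc (pvLits variable_values)) ≠ [] := by
      rw [Ne, List.filterMap_eq_nil_iff]
      intro hcon
      apply hall
      intro c hc
      exact (pvProc_eq_none hgood c).mp (hcon c hc)
    have hmem : ([] ∈ clauses.filterMap (pvProc (pvLits variable_values))) ↔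
        ∃ c ∈ clauses, c.Nodup ∧ ∀ l ∈ c, -l ∈ pvLits variable_values ∧ l ∉ pvLits variable_values := by
      rw [List.mem_filterMap]
      constructor
      · rintro ⟨c, hc, hp⟩; exact ⟨c, hc, (pvProc_eq_some_nil hgood c).mp hp⟩
      · rintro ⟨c, hc, hp⟩; exact ⟨c, hc, (pvProc_eq_some_nil hgood c).mpr hp⟩
    rw [if_neg hne, if_neg hall]
    by_cases hex : ∃ c ∈ clauses, c.Nodup ∧ ∀ l ∈ c, -l ∈ pvLits variable_values ∧ l ∉ pvLits variable_values
    · rw [if_pos (hmem.mpr hex), if_pos hex]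
    · rw [if_neg (fun h => hex (hmem.mp h)), if_neg hex]

lemma masterB (clauses : List (List Int)) (variable_values : List (Int × Bool)) :
    checkSolve_alt clauses variable_values =
      (if ∀ c ∈ clauses, ∃ l ∈ c, l ∈ pvLits variable_values then some true
       else if ∃ c ∈ clauses, (¬ ∃ l ∈ c, l ∈ pvLits variable_values) ∧
              ∀ l ∈ c, -l ∈ pvLits variable_values then some false
       else none) := by
  have hL : ((PySem.Dict.ofList variable_values).items.map (fun p => if p.2 then p.1 else -p.1))
      = pvLits variable_values := rfl
  simp only [checkSolve_alt]
  rw [hL, B_fold]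
  have hcont : ∀ x : Int,
      (PySem.Set.ofList (pvLits variable_values)).contains x = true ↔
        x ∈ pvLits variable_values := by
    intro x; rw [PySem.Set.contains_iff, PySem.Set.mem_ofList]
  have hsat : ∀ c : List Int,
      (c.any fun l => (PySem.Set.ofList (pvLits variable_values)).contains l) = true ↔
        ∃ l ∈ c, l ∈ pvLits variable_values := by
    intro c; rw [List.any_eq_true]
    constructor
    · rintro ⟨l, hl, h⟩; exact ⟨l, hl, (hcont l).mp h⟩
    · rintro ⟨l, hl, h⟩; exact ⟨l, hl, (hcont l).mpr h⟩
  have hemp : ∀ c : List Int,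
      (c.all fun l => (PySem.Set.ofList (pvLits variable_values)).contains (-l)) = true ↔
        ∀ l ∈ c, -l ∈ pvLits variable_values := by
    intro c; rw [List.all_eq_true]
    constructor
    · intro h l hl; exact (hcont (-l)).mp (h l hl)
    · intro h l hl; exact (hcont (-l)).mpr (h l hl)
  simp only [Bool.true_and, Bool.false_or]
  by_cases hall : ∀ c ∈ clauses, ∃ l ∈ c, l ∈ pvLits variable_values
  · have h1 : clauses.all
        (fun c => c.any fun l => (PySem.Set.ofList (pvLits variable_values)).contains l) = true := by
      rw [List.all_eq_true]; intro c hc; exact (hsat c).mpr (hall c hc)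
    rw [h1, if_pos rfl, if_pos hall]
  · have h1 : clauses.all
        (fun c => c.any fun l => (PySem.Set.ofList (pvLits variable_values)).contains l) = false := by
      rw [Bool.eq_false_iff]
      intro hcon
      rw [List.all_eq_true] at hcon
      exact hall (fun c hc => (hsat c).mp (hcon c hc))
    rw [h1, if_neg (by simp), if_neg hall]
    have hany : (clauses.any fun c =>
        (!(c.any fun l => (PySem.Set.ofList (pvLits variable_values)).contains l)) &&
        (c.all fun l => (PySem.Set.ofList (pvLits variable_values)).contains (-l))) = true ↔
        ∃ c ∈ clauses, (¬ ∃ l ∈ c, l ∈ pvLits variable_values) ∧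
          ∀ l ∈ c, -l ∈ pvLits variable_values := by
      rw [List.any_eq_true]
      constructor
      · rintro ⟨c, hc, hb⟩
        rw [Bool.and_eq_true] at hb
        refine ⟨c, hc, ?_, (hemp c).mp hb.2⟩
        intro hcon
        have := (hsat c).mpr hcon
        rw [this] at hb
        simp at hb
      · rintro ⟨c, hc, hns, hf⟩
        refine ⟨c, hc, ?_⟩
        rw [Bool.and_eq_true]
        refine ⟨?_, (hemp c).mpr hf⟩
        rw [Bool.not_eq_eq_eq_not, Bool.not_true, Bool.eq_false_iff]
        intro hcon
        exact hns ((hsat c).mp hcon)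
    by_cases hex : ∃ c ∈ clauses, (¬ ∃ l ∈ c, l ∈ pvLits variable_values) ∧
        ∀ l ∈ c, -l ∈ pvLits variable_values
    · rw [hany.mpr hex, if_pos rfl, if_pos hex]
    · have h2 : (clauses.any fun c =>
          (!(c.any fun l => (PySem.Set.ofList (pvLits variable_values)).contains l)) &&
          (c.all fun l => (PySem.Set.ofList (pvLits variable_values)).contains (-l))) = false := by
        rw [Bool.eq_false_iff]
        intro hcon
        exact hex (hany.mp hcon)
      rw [h2, if_neg (by simp), if_neg hex]

-- strict falsification of a clause, in two equivalent phrasings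
lemma SF_iff (ls : List Int) (c : List Int) :
    (∀ l ∈ c, -l ∈ ls ∧ l ∉ ls) ↔ ((¬ ∃ l ∈ c, l ∈ ls) ∧ ∀ l ∈ c, -l ∈ ls) := by
  constructor
  · intro h
    exact ⟨fun ⟨l, hl, hm⟩ => (h l hl).2 hm, fun l hl => (h l hl).1⟩
  · rintro ⟨hns, hf⟩ l hl
    exact ⟨hf l hl, fun hm => hns ⟨l, hl, hm⟩⟩

-- D_ restated through pvLits
lemma D_iff (clauses : List (List Int)) (variable_values : List (Int × Bool))
    (hpre : Pre_checkSolve clauses variable_values) :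
    D_checkSolve clauses variable_values ↔
      ((∃ c ∈ clauses, (∀ l ∈ c, -l ∈ pvLits variable_values ∧ l ∉ pvLits variable_values) ∧
          ¬ c.Nodup) ∧
       (∀ c ∈ clauses, (∀ l ∈ c, -l ∈ pvLits variable_values ∧ l ∉ pvLits variable_values) →
          ¬ c.Nodup)) := by
  have hgood : pvGood (pvLits variable_values) := pvGood_pvLits (fun p hp => hpre p hp)
  have hb : ∀ l : Int,
      (l ≠ 0 ∧ ((PySem.Dict.ofList variable_values).get? (-l) = some true ∨
                (PySem.Dict.ofList variable_values).get? l = some false)) ↔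
      (-l ∈ pvLits variable_values ∧ l ∉ pvLits variable_values) := by
    intro l
    constructor
    · rintro ⟨h0, hf⟩
      have hm : -l ∈ pvLits variable_values := by
        rw [mem_pvLits]; simpa using hf
      refine ⟨hm, fun hmem => ?_⟩
      exact pvGood_not_neg hgood h0 hmem hm
    · rintro ⟨hm, hnm⟩
      have h0 : l ≠ 0 := by
        intro he; rw [he] at hm hnm; simp at hm; exact hnm hm
      refine ⟨h0, ?_⟩
      rw [mem_pvLits] at hm
      simpa using hm
  simp only [D_checkSolve, pvFalsC]
  constructor
  · rintro ⟨⟨c, hc, hf⟩, hall⟩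
    exact ⟨⟨c, hc, fun l hl => (hb l).mp (hf l hl), hall c hc hf⟩,
           fun c hc hf => hall c hc (fun l hl => (hb l).mpr (hf l hl))⟩
  · rintro ⟨⟨c, hc, hf, _⟩, hall⟩
    exact ⟨⟨c, hc, fun l hl => (hb l).mpr (hf l hl)⟩,
           fun c hc hf => hall c hc (fun l hl => (hb l).mp (hf l hl))⟩

-- ===== VERDICT (by name: the statement is the Claim_ definition above) =====
theorem checkSolve_spec : Claim_unchanged_checkSolve := by
  intro clauses variable_values _ hpre hnd
  rw [masterA clauses variable_values hpre, masterB clauses variable_values]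
  rw [D_iff clauses variable_values hpre] at hnd
  by_cases hall : ∀ c ∈ clauses, ∃ l ∈ c, l ∈ pvLits variable_values
  · rw [if_pos hall, if_pos hall]
  · rw [if_neg hall, if_neg hall]
    by_cases hex : ∃ c ∈ clauses, c.Nodup ∧
        ∀ l ∈ c, -l ∈ pvLits variable_values ∧ l ∉ pvLits variable_values
    · obtain ⟨c, hc, hnd', hf⟩ := hex
      rw [if_pos ⟨c, hc, hnd', hf⟩, if_pos ⟨c, hc, (SF_iff _ c).mp hf⟩]
    · rw [if_neg hex]
      by_cases hex2 : ∃ c ∈ clauses, (¬ ∃ l ∈ c, l ∈ pvLits variable_values) ∧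
          ∀ l ∈ c, -l ∈ pvLits variable_values
      · exfalso
        apply hnd
        obtain ⟨c, hc, hp⟩ := hex2
        have hf : ∀ l ∈ c, -l ∈ pvLits variable_values ∧ l ∉ pvLits variable_values :=
          (SF_iff _ c).mpr hp
        have hndc : ¬ c.Nodup := fun hn => hex ⟨c, hc, hn, hf⟩
        exact ⟨⟨c, hc, hf, hndc⟩, fun c' hc' hf' => fun hn => hex ⟨c', hc', hn, hf'⟩⟩
      · rw [if_neg hex2]

theorem checkSolve_changed : Claim_changed_checkSolve := by
  unfold Claim_changed_checkSolve; decide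

theorem checkSolve_tight : Claim_exact_checkSolve := by
  intro clauses variable_values _ hpre hd
  rw [masterA clauses variable_values hpre, masterB clauses variable_values]
  rw [D_iff clauses variable_values hpre] at hd
  obtain ⟨⟨c, hc, hf, hndc⟩, hall⟩ := hd
  have hnall : ¬ ∀ c' ∈ clauses, ∃ l ∈ c', l ∈ pvLits variable_values := by
    intro hcon
    obtain ⟨l, hl, hls⟩ := hcon c hc
    exact (hf l hl).2 hls
  have hnex : ¬ ∃ c' ∈ clauses, c'.Nodup ∧
      ∀ l ∈ c', -l ∈ pvLits variable_values ∧ l ∉ pvLits variable_values := by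
    rintro ⟨c', hc', hn, hf'⟩
    exact hall c' hc' hf' hn
  have hex2 : ∃ c' ∈ clauses, (¬ ∃ l ∈ c', l ∈ pvLits variable_values) ∧
      ∀ l ∈ c', -l ∈ pvLits variable_values := ⟨c, hc, (SF_iff _ c).mp hf⟩
  rw [if_neg hnall, if_neg hnall, if_neg hnex, if_pos hex2]
  simp
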